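-- pv_equiv track=rewrite | github.com/mispython/AimanPython | Conv_Py/EIBQADR5.py | extract_postmail
-- ===== SOURCE A (Python) =====
-- def extract_postmail(row: dict) -> str:
--     digits = set("0123456789")
--     for i in range(1, 9):
--         val    = str(row.get(f"NAMELN{i}") or "").ljust(40)
--         first5 = val[:5]
--         if len(first5) == 5 and all(c in digits for c in first5):
--             c6 = val[5:6]
--             c7 = val[6:7]
--             c8 = val[7:8]
--             if not c6 or c6 not in digits:
--                 return first5.rjust(7)
--             elif not c7 or c7 not in digits:
--                 return val[:6].rjust(7)
--             elif not c8 or c8 not in digits: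
--                 return val[:7].rjust(7)
--     return " "   # IF I > 8 THEN POSTMAIL = ' '
-- ===== SOURCE B (Python) =====
-- def extract_postmail(row: dict) -> str:
--     for i in range(1, 9):
--         val = str(row.get(f"NAMELN{i}") or "").ljust(40)
--         n = 0
--         for c in val:
--             if c in "0123456789":
--                 n += 1
--             else:
--                 break
--         if 5 <= n <= 7:
--             return val[:n].rjust(7)
--     return " "
-- ===== Notes on version B (the rewrite author's own statement) =====
-- stated objective: simpler
-- what changed: Replaces A's positional first5/c6/c7/c8 slice-and-branch chain with a single inner loop that counts leading digit characters, then one guard 5 <= n <= 7 selecting val[:n].rjust(7).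
import Mathlib
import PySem

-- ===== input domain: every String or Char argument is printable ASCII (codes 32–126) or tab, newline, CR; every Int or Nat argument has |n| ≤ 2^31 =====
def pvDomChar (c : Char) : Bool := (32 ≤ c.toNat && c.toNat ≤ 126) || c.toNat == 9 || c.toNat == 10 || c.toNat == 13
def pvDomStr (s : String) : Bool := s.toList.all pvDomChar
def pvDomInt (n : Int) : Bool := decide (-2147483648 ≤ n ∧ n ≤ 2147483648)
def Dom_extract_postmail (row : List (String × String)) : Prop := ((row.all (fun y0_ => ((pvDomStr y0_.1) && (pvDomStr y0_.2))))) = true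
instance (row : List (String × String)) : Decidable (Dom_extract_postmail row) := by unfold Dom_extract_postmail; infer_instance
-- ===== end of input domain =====

-- B replaces A's unrolled positional c6/c7/c8 branch chain by a single leading-digit counter loop
-- with one range guard (objective: simpler); return value only, no mutation on either side.

-- ===== PORT A =====
-- digits = set("0123456789") : a set of one-character strings
def pvDigitsSetA : PySem.Set (List Char) :=
  PySem.Set.ofList (("0123456789".toList).map (fun c => [c]))

-- val = str(row.get(f"NAMELN{i}") or "").ljust(40)   (shared verbatim by both Pythons)
def pvLjust (cs : List Char) (w : Nat) : List Char := cs ++ List.replicate (w - cs.length) ' '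

def pvRjust (cs : List Char) (w : Nat) : List Char := List.replicate (w - cs.length) ' ' ++ cs

def pvVal (row : List (String × String)) (i : Int) : List Char :=
  pvLjust (((match (PySem.Dict.mk row).get? ("NAMELN" ++ PySem.Int.toStr i) with
             | some s => if s = "" then "" else s
             | none => "")).toList) 40

-- the body of A's for-loop: some r = "return r", none = fall through to the next i
def pvFieldA (val : List Char) : Option String :=
  let first5 := PySem.List.slice val none (some 5)
  if first5.length = 5 ∧ ∀ c ∈ first5, [c] ∈ pvDigitsSetA then
    let c6 := PySem.List.slice val (some 5) (some 6)
    let c7 := PySem.List.slice val (some 6) (some 7)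
    let c8 := PySem.List.slice val (some 7) (some 8)
    if c6 = [] ∨ c6 ∉ pvDigitsSetA then some (String.ofList (pvRjust first5 7))
    else if c7 = [] ∨ c7 ∉ pvDigitsSetA then some (String.ofList (pvRjust (PySem.List.slice val none (some 6)) 7))
    else if c8 = [] ∨ c8 ∉ pvDigitsSetA then some (String.ofList (pvRjust (PySem.List.slice val none (some 7)) 7))
    else none
  else none

def pvGoA (row : List (String × String)) : List Int → String
  | [] => " "
  | i :: is =>
    match pvFieldA (pvVal row i) with
    | some r => r
    | none => pvGoA row is

def extract_postmail (row : List (String × String)) : String :=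
  pvGoA row (PySem.List.pyRange 1 9 1)

-- ===== PORT B =====
-- n = number of leading chars of val that are in "0123456789" (inner counting loop of B)
def pvCountB : List Char → Nat
  | [] => 0
  | c :: cs => if c ∈ "0123456789".toList then pvCountB cs + 1 else 0

-- the body of B's for-loop: count, then one range guard
def pvFieldB (val : List Char) : Option String :=
  let n := pvCountB val
  if 5 ≤ n ∧ n ≤ 7 then some (String.ofList (pvRjust (val.take n) 7)) else none

def pvGoB (row : List (String × String)) : List Int → String
  | [] => " "
  | i :: is =>
    match pvFieldB (pvVal row i) with
    | some r => r
    | none => pvGoB row is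

def extract_postmail_alt (row : List (String × String)) : String :=
  pvGoB row (PySem.List.pyRange 1 9 1)

-- ===== PRECONDITION & SPEC =====
def Spec_extract_postmail (row : List (String × String)) (out : String) : Prop := out = extract_postmail_alt row
instance (row : List (String × String)) (out : String) : Decidable (Spec_extract_postmail row out) := by unfold Spec_extract_postmail; infer_instance

-- ===== CLAIM (what is proved, stated in full; the proofs are below) =====
def Claim_equal_extract_postmail : Prop := ∀ (row : List (String × String)), Dom_extract_postmail row → Spec_extract_postmail row (extract_postmail row)

-- ===== LEMMAS AND PROOFS =====

lemma pv_mem_digits (c : Char) : [c] ∈ pvDigitsSetA ↔ c ∈ "0123456789".toList := by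
  simp [pvDigitsSetA, PySem.Set.mem_ofList]

lemma pv_exists8 (val : List Char) (h : 8 ≤ val.length) :
    ∃ a b c d e f g k t, val = a :: b :: c :: d :: e :: f :: g :: k :: t := by
  match val, h with
  | a :: b :: c :: d :: e :: f :: g :: k :: t, _ => exact ⟨a, b, c, d, e, f, g, k, t, rfl⟩

lemma pv_len_val (row : List (String × String)) (i : Int) : 8 ≤ (pvVal row i).length := by
  simp [pvVal, pvLjust]; omega

set_option maxHeartbeats 2000000 in
lemma pv_field_eq (val : List Char) (h : 8 ≤ val.length) : pvFieldA val = pvFieldB val := by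
  obtain ⟨a, b, c, d, e, f, g, k, t, rfl⟩ := pv_exists8 val h
  simp only [pvFieldA, pvFieldB, pvCountB]
  rw [PySem.List.slice_to _ (by norm_num : (0:Int) ≤ 5),
      PySem.List.slice_to _ (by norm_num : (0:Int) ≤ 6),
      PySem.List.slice_to _ (by norm_num : (0:Int) ≤ 7),
      PySem.List.slice_toNat _ (by norm_num : (0:Int) ≤ 5) (by norm_num : (0:Int) ≤ 6),
      PySem.List.slice_toNat _ (by norm_num : (0:Int) ≤ 6) (by norm_num : (0:Int) ≤ 7),
      PySem.List.slice_toNat _ (by norm_num : (0:Int) ≤ 7) (by norm_num : (0:Int) ≤ 8)]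
  simp only [pv_mem_digits, Int.reduceToNat, Nat.reduceSub, List.take_succ_cons, List.take_zero,
    List.drop_succ_cons, List.drop_zero, List.forall_mem_cons,
    List.length_cons, List.length_nil, Nat.reduceAdd]
  generalize ("0123456789".toList : List Char) = D
  by_cases ha : a ∈ D <;>
  by_cases hb : b ∈ D <;>
  by_cases hc : c ∈ D <;>
  by_cases hd : d ∈ D <;>
  by_cases he : e ∈ D <;>
  by_cases hf : f ∈ D <;>
  by_cases hg : g ∈ D <;>
  by_cases hk : k ∈ D <;>
  simp_all

lemma pv_go_eq (row : List (String × String)) (is : List Int) : pvGoA row is = pvGoB row is := by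
  induction is with
  | nil => rfl
  | cons i is ih =>
    simp only [pvGoA, pvGoB, pv_field_eq (pvVal row i) (pv_len_val row i), ih]

-- ===== VERDICT (by name: the statement is the Claim_ definition above) =====
theorem extract_postmail_spec : Claim_equal_extract_postmail := by
  intro row _
  unfold Spec_extract_postmail extract_postmail extract_postmail_alt
  exact pv_go_eq row _
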